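-- pv_equiv track=rewrite | github.com/allenai/OLMo-core | src/olmo_core/internal/ri_olmo/model_ladder_v1.py | _extract_and_remove_overrides
-- ===== SOURCE A (Python) =====
-- from typing import Optional, Tuple
--
-- def _extract_and_remove_overrides(
--     overrides: list[str], prefix: str
-- ) -> tuple[list[str], Optional[str]]:
--     """Extract override with given prefix and remove it from the list."""
--     value = None
--     remaining = []
--     for override in overrides:
--         if override.startswith(f"{prefix}="):
--             value = override.split("=", 1)[1]
--         else:
--             remaining.append(override)
--     return remaining, value
-- ===== SOURCE B (Python) =====
-- def _extract_and_remove_overrides(overrides, prefix):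
--     """Two independent passes: keep the non-matching overrides, collect all
--     matched values and take the last (None if none matched)."""
--     p = f"{prefix}="
--     remaining = [o for o in overrides if not o.startswith(p)]
--     matches = [o.split("=", 1)[1] for o in overrides if o.startswith(p)]
--     value = matches[-1] if matches else None
--     return remaining, value
-- ===== Notes on version B (the rewrite author's own statement) =====
-- stated objective: simpler
-- what changed: Replaces A's single fused loop with a running value by two independent comprehension passes (remaining = non-matches, matches = extracted values) and takes the last match, eliminating mutable loop state.
import Mathlib
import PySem

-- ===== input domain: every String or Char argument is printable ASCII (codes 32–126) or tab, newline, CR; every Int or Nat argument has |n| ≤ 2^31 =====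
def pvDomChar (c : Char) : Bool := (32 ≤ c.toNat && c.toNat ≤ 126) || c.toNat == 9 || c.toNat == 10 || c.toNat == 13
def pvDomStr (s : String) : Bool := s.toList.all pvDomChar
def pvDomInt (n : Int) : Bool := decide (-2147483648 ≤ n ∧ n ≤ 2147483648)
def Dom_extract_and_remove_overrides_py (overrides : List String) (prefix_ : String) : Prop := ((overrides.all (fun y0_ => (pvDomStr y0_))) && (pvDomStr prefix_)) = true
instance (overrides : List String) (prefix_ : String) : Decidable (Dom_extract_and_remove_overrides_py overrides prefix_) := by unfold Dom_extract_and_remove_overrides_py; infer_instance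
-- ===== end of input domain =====

-- B replaces A's single fused loop (running `value`) by two independent filter passes,
-- taking the last matched value; objective: simpler decomposition.

-- ===== PORT A =====
-- override.split("=", 1)[1]; the [1] is always in range wherever A evaluates it
-- (the branch guard guarantees "=" occurs), so pyGet? is exact there.
def pvSplitVal (o : String) : Option String :=
  PySem.List.pyGet? ((PySem.Str.splitMax? o "=" 1).getD []) 1

def extract_and_remove_overrides_py (overrides : List String) (prefix_ : String) : List String × Option String :=
  let res := overrides.foldl
    (fun (acc : List String × Option String) override =>
      if PySem.Str.startswith override (prefix_ ++ "=") then
        (acc.1, pvSplitVal override)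
      else
        (acc.1 ++ [override], acc.2))
    ([], none)
  (res.1, res.2)

-- ===== PORT B =====
def extract_and_remove_overrides_py_alt (overrides : List String) (prefix_ : String) : List String × Option String :=
  let p := prefix_ ++ "="
  let remaining := overrides.filter (fun o => !PySem.Str.startswith o p)
  let pvMatches := (overrides.filter (fun o => PySem.Str.startswith o p)).map pvSplitVal
  let value := pvMatches.getLastD none   -- pvMatches[-1] if pvMatches else None
  (remaining, value)

-- ===== PRECONDITION & SPEC =====
def Spec_extract_and_remove_overrides_py (overrides : List String) (prefix_ : String) (out : List String × Option String) : Prop := out = extract_and_remove_overrides_py_alt overrides prefix_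
instance (overrides : List String) (prefix_ : String) (out : List String × Option String) : Decidable (Spec_extract_and_remove_overrides_py overrides prefix_ out) := by unfold Spec_extract_and_remove_overrides_py; infer_instance

-- ===== CLAIM (what is proved, stated in full; the proofs are below) =====
def Claim_equal_extract_and_remove_overrides_py : Prop := ∀ (overrides : List String) (prefix_ : String), Dom_extract_and_remove_overrides_py overrides prefix_ → Spec_extract_and_remove_overrides_py overrides prefix_ (extract_and_remove_overrides_py overrides prefix_)

-- ===== LEMMAS AND PROOFS =====
theorem pv_loop_eq (p : String) :
    ∀ (l : List String) (r : List String) (v : Option String),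
      l.foldl
        (fun (acc : List String × Option String) override =>
          if PySem.Str.startswith override p then
            (acc.1, pvSplitVal override)
          else
            (acc.1 ++ [override], acc.2))
        (r, v)
      = (r ++ l.filter (fun o => !PySem.Str.startswith o p),
         ((l.filter (fun o => PySem.Str.startswith o p)).map pvSplitVal).getLastD v) := by
  intro l
  induction l with
  | nil => intro r v; simp
  | cons o t ih =>
    intro r v
    cases hb : PySem.Str.startswith o p
    · simp only [List.foldl_cons, List.filter_cons, hb, Bool.not_false, if_true,
        Bool.false_eq_true, if_false, ih]
      simp
    · simp only [List.foldl_cons, List.filter_cons, hb, Bool.not_true,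
        Bool.false_eq_true, if_false, if_true, ih, List.map_cons, List.getLastD_cons]

-- ===== VERDICT (by name: the statement is the Claim_ definition above) =====
theorem extract_and_remove_overrides_py_spec : Claim_equal_extract_and_remove_overrides_py := by
  intro overrides prefix_ _
  simp only [Spec_extract_and_remove_overrides_py, extract_and_remove_overrides_py,
    extract_and_remove_overrides_py_alt]
  rw [pv_loop_eq]
  simp
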